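-- pv_equiv track=rewrite | github.com/daniel-reich/turbo-robot | 6vSZmN66xhMRDX8YT_18.py | advanced_sort
-- ===== SOURCE A (Python) =====
-- from collections import Counter
--
-- def advanced_sort(lst):
--   result=list()
--   x=Counter(lst)
--   included=list()
--   for i in lst:
--     if(i not in included):
--       a=list()
--       included.append(i)
--       for j in range(0,x[i]):
--         a.append(i)
--       result.append(a)
--   return result
-- ===== SOURCE B (Python) =====
-- def advanced_sort(lst):
--   groups = {}
--   for i in lst:
--     groups.setdefault(i, []).append(i)
--   return list(groups.values())
-- ===== Notes on version B (the rewrite author's own statement) =====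
-- stated objective: idiomatic
-- what changed: Single pass appending each element to its own dict bucket (insertion-ordered) and returning the values, instead of a Counter plus an 'included' membership list with an inner range loop rebuilding each group.
import Mathlib
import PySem

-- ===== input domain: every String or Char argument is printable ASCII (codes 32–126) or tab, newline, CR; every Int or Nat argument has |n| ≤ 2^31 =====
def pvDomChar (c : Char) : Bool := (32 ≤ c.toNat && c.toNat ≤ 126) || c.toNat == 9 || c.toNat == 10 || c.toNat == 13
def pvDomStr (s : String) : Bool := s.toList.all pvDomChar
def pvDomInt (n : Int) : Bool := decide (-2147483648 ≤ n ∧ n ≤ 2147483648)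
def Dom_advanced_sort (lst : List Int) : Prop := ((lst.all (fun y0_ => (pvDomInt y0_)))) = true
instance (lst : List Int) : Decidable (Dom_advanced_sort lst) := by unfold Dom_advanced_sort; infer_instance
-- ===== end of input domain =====

-- B groups each element into its own dict bucket in one pass and returns the values,
-- replacing A's Counter + membership list + inner range loop.

-- ===== PORT A =====
def advanced_sort (lst : List Int) : List (List Int) :=
  let x := PySem.Dict.counter lst
  let st := lst.foldl (fun (st : List (List Int) × List Int) i =>
    if i ∉ st.2 then
      let a := (PySem.List.pyRange 0 (x.getD i 0) 1).foldl (fun a _ => a ++ [i]) ([] : List Int)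
      (st.1 ++ [a], st.2 ++ [i])
    else st) ([], [])
  st.1

-- ===== PORT B =====
def advanced_sort_alt (lst : List Int) : List (List Int) :=
  (lst.foldl (fun (groups : PySem.Dict Int (List Int)) i =>
    groups.modify i [] (· ++ [i])) PySem.Dict.empty).values

-- ===== PRECONDITION & SPEC =====
def Spec_advanced_sort (lst : List Int) (out : List (List Int)) : Prop := out = advanced_sort_alt lst
instance (lst : List Int) (out : List (List Int)) : Decidable (Spec_advanced_sort lst out) := by unfold Spec_advanced_sort; infer_instance

-- ===== CLAIM (what is proved, stated in full; the proofs are below) =====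
def Claim_equal_advanced_sort : Prop := ∀ (lst : List Int), Dom_advanced_sort lst → Spec_advanced_sort lst (advanced_sort lst)

-- ===== LEMMAS AND PROOFS =====

-- A's inner loop building one group, as a function of the counter
def pvGroupA (x : PySem.Dict Int Int) (i : Int) : List Int :=
  (PySem.List.pyRange 0 (x.getD i 0) 1).foldl (fun a _ => a ++ [i]) ([] : List Int)

lemma set_add_prefix (s : PySem.Set Int) (x : Int) : s <+: PySem.Set.add s x := by
  unfold PySem.Set.add
  split
  · exact List.prefix_refl s
  · exact List.prefix_append s [x]

lemma set_update_prefix (l : List Int) : ∀ (s : PySem.Set Int), s <+: PySem.Set.update s l := by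
  induction l with
  | nil => intro s; exact List.prefix_refl s
  | cons x t ih =>
    intro s
    exact (set_add_prefix s x).trans (ih (PySem.Set.add s x))

lemma drop_of_prefix_snoc (s : List Int) (x : Int) (L : List Int)
    (h : (s ++ [x]) <+: L) : L.drop s.length = x :: L.drop (s.length + 1) := by
  obtain ⟨r, rfl⟩ := h
  have h1 : ((s ++ [x]) ++ r).drop s.length = [x] ++ r := by
    rw [List.append_assoc, List.drop_left]
  have h2 : ((s ++ [x]) ++ r).drop (s.length + 1) = r := by
    rw [show s.length + 1 = (s ++ [x]).length by simp, List.drop_left]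
  rw [h1, h2]; rfl

lemma a_loop (x : PySem.Dict Int Int) :
    ∀ (l : List Int) (result : List (List Int)) (inc : List Int),
    l.foldl (fun (st : List (List Int) × List Int) i =>
      if i ∉ st.2 then
        ((st.1 ++ [(PySem.List.pyRange 0 (x.getD i 0) 1).foldl (fun a _ => a ++ [i]) ([] : List Int)]),
         st.2 ++ [i])
      else st) (result, inc)
    = (result ++ ((PySem.Set.update inc l).drop inc.length).map (pvGroupA x),
       PySem.Set.update inc l) := by
  intro l
  induction l with
  | nil => intro result inc; simp [PySem.Set.update]
  | cons i t ih =>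
    intro result inc
    by_cases hi : i ∈ inc
    · have hadd : PySem.Set.add inc i = inc := by
        unfold PySem.Set.add
        simp [hi]
      simp only [List.foldl_cons]
      rw [if_neg (not_not_intro hi)]
      rw [show PySem.Set.update inc (i :: t) = PySem.Set.update inc t by
        simp [PySem.Set.update, hadd]]
      exact ih result inc
    · have hadd : PySem.Set.add inc i = inc ++ [i] := by
        unfold PySem.Set.add
        simp [hi]
      have hupd : PySem.Set.update inc (i :: t) = PySem.Set.update (inc ++ [i]) t := by
        simp [PySem.Set.update, hadd]
      simp only [List.foldl_cons]
      rw [if_pos hi]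
      rw [ih (result ++ [(PySem.List.pyRange 0 (x.getD i 0) 1).foldl (fun a _ => a ++ [i]) ([] : List Int)]) (inc ++ [i])]
      rw [hupd]
      have hpre : (inc ++ [i]) <+: PySem.Set.update (inc ++ [i]) t := set_update_prefix t (inc ++ [i])
      rw [drop_of_prefix_snoc inc i _ hpre]
      simp [pvGroupA]

lemma pvGroupA_counter (lst : List Int) (k : Int) :
    pvGroupA (PySem.Dict.counter lst) k = List.replicate (lst.count k) k := by
  unfold pvGroupA
  rw [PySem.Dict.getD_counter]
  rw [PySem.List.foldl_append_singleton_eq_map (f := fun _ => k)]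
  rw [PySem.List.pyRange_zero_natCast]
  simp [Function.comp_def, List.map_const', List.length_range]

lemma b_loop (l : List Int) :
    ∀ (d : PySem.Dict Int (List Int)) (k : Int),
    (l.foldl (fun (d : PySem.Dict Int (List Int)) i => d.modify i [] (· ++ [i])) d).getD k []
    = d.getD k [] ++ List.replicate (l.count k) k := by
  induction l with
  | nil => intro d k; simp
  | cons i t ih =>
    intro d k
    simp only [List.foldl_cons]
    rw [ih]
    rw [PySem.Dict.getD_modify]
    by_cases hk : k = i
    · subst hk
      simp [List.count_cons_self, List.replicate_succ, List.append_assoc]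
    · simp [hk, Ne.symm hk]

lemma b_keys (lst : List Int) :
    (lst.foldl (fun (d : PySem.Dict Int (List Int)) i => d.modify i [] (· ++ [i])) PySem.Dict.empty).keys
    = PySem.Set.ofList lst := by
  rw [PySem.Dict.keys_foldl_modify lst ([] : List Int) (fun _ i => (· ++ [i])) PySem.Dict.empty]
  simp [PySem.Set.ofList, PySem.Set.update, PySem.Dict.keys_empty]

-- ===== VERDICT (by name: the statement is the Claim_ definition above) =====
theorem advanced_sort_spec : Claim_equal_advanced_sort := by
  intro lst _
  unfold Spec_advanced_sort advanced_sort advanced_sort_alt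
  simp only []
  rw [a_loop (PySem.Dict.counter lst) lst [] []]
  have hnodup : (lst.foldl (fun (d : PySem.Dict Int (List Int)) i => d.modify i [] (· ++ [i])) PySem.Dict.empty).keys.Nodup := by
    exact PySem.Dict.nodup_keys_foldl_modify_key lst (fun i => i) ([] : List Int)
      (fun _ i => (· ++ [i])) PySem.Dict.empty (by simp)
  rw [PySem.Dict.values_eq_map_keys _ hnodup ([] : List Int)]
  rw [b_keys]
  have : PySem.Set.update ([] : List Int) lst = PySem.Set.ofList lst := by
    simp [PySem.Set.ofList, PySem.Set.update]
  rw [this]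
  apply List.map_congr_left
  intro k _
  rw [pvGroupA_counter, b_loop]
  simp
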